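-- pv_equiv track=rewrite | github.com/ArticlZ/Zhatikov_Web_Kurs_221-3210 | KP/app/app.py | validate_create_password
-- ===== SOURCE A (Python) =====
-- def validate_create_password(password, confirm_password):
--     errors = {}
--     if len(password) < 8 or len(password) > 128:
--         errors['password'] = 'Пароль должен быть от 8 до 128 символов.'
--     if not any(c.isupper() for c in password):
--         errors['password'] = 'Пароль должен содержать хотя бы одну заглавную букву.'
--     if not any(c.islower() for c in password):
--         errors['password'] = 'Пароль должен содержать хотя бы одну строчную букву.'
--     if not any(c.isdigit() for c in password):
--         errors['password'] = 'Пароль должен содержать хотя бы одну цифру.'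
--     if any(c.isspace() for c in password):
--         errors['password'] = 'Пароль не должен содержать пробелы.'
--     if password != confirm_password:
--         errors['confirm_password'] = 'Пароли не совпадают.'
--     return errors
-- ===== SOURCE B (Python) =====
-- def validate_create_password(password, confirm_password):
--     has_upper = has_lower = has_digit = has_space = False
--     for c in password:
--         if c.isupper():
--             has_upper = True
--         elif c.islower():
--             has_lower = True
--         elif c.isdigit():
--             has_digit = True
--         if c.isspace():
--             has_space = True
--     errors = {}
--     if not 8 <= len(password) <= 128:
--         errors['password'] = 'Пароль должен быть от 8 до 128 символов.'
--     if not has_upper: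
--         errors['password'] = 'Пароль должен содержать хотя бы одну заглавную букву.'
--     if not has_lower:
--         errors['password'] = 'Пароль должен содержать хотя бы одну строчную букву.'
--     if not has_digit:
--         errors['password'] = 'Пароль должен содержать хотя бы одну цифру.'
--     if has_space:
--         errors['password'] = 'Пароль не должен содержать пробелы.'
--     if password != confirm_password:
--         errors['confirm_password'] = 'Пароли не совпадают.'
--     return errors
-- ===== Notes on version B (the rewrite author's own statement) =====
-- stated objective: alternative
-- what changed: A's four separate any(...) scans over the password are replaced by a single explicit pass that accumulates has_upper/has_lower/has_digit/has_space flags, which are then tested in A's original order so later error messages overwrite earlier ones identically; one traversal instead of four gives a constant-factor speedup.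
import Mathlib
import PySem

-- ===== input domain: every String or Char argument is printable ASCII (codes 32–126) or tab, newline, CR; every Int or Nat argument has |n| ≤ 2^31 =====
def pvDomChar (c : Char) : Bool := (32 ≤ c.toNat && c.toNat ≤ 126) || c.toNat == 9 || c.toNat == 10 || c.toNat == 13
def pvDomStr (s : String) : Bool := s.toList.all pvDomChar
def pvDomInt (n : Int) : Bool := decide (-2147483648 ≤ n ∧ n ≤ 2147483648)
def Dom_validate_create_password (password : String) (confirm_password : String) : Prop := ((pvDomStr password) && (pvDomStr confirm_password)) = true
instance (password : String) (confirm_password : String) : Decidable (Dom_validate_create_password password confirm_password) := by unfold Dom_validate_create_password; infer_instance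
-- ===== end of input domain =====

-- B replaces A's four separate any(...) scans of the password by one explicit pass that
-- accumulates the four character-class flags, keeping the same error-overwrite order (objective: alternative).

-- ===== PORT A =====
-- literal transliteration of A: four separate any(...) scans, dict updates in source order
def validate_create_password (password : String) (confirm_password : String) : List (String × String) :=
  let errors : PySem.Dict String String := PySem.Dict.empty
  let errors := if PySem.Str.len password < 8 ∨ PySem.Str.len password > 128 then
    errors.insert "password" "Пароль должен быть от 8 до 128 символов." else errors
  let errors := if !(password.toList.any PySem.Chars.isupper) then
    errors.insert "password" "Пароль должен содержать хотя бы одну заглавную букву." else errors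
  let errors := if !(password.toList.any PySem.Chars.islower) then
    errors.insert "password" "Пароль должен содержать хотя бы одну строчную букву." else errors
  let errors := if !(password.toList.any PySem.Chars.isdigit) then
    errors.insert "password" "Пароль должен содержать хотя бы одну цифру." else errors
  let errors := if password.toList.any PySem.Chars.isspace then
    errors.insert "password" "Пароль не должен содержать пробелы." else errors
  let errors := if password ≠ confirm_password then
    errors.insert "confirm_password" "Пароли не совпадают." else errors
  errors.items

-- ===== PORT B =====
-- one pass over the characters accumulating (has_upper, has_lower, has_digit, has_space),
-- mirroring Source B's if/elif chain
def pvFlagsStep (s : Bool × Bool × Bool × Bool) (c : Char) : Bool × Bool × Bool × Bool :=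
  let s :=
    if PySem.Chars.isupper c then (true, s.2.1, s.2.2.1, s.2.2.2)
    else if PySem.Chars.islower c then (s.1, true, s.2.2.1, s.2.2.2)
    else if PySem.Chars.isdigit c then (s.1, s.2.1, true, s.2.2.2)
    else s
  if PySem.Chars.isspace c then (s.1, s.2.1, s.2.2.1, true) else s

def validate_create_password_alt (password : String) (confirm_password : String) : List (String × String) :=
  let flags := password.toList.foldl pvFlagsStep (false, false, false, false)
  let errors : PySem.Dict String String := PySem.Dict.empty
  let errors := if ¬ (8 ≤ PySem.Str.len password ∧ PySem.Str.len password ≤ 128) then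
    errors.insert "password" "Пароль должен быть от 8 до 128 символов." else errors
  let errors := if !flags.1 then
    errors.insert "password" "Пароль должен содержать хотя бы одну заглавную букву." else errors
  let errors := if !flags.2.1 then
    errors.insert "password" "Пароль должен содержать хотя бы одну строчную букву." else errors
  let errors := if !flags.2.2.1 then
    errors.insert "password" "Пароль должен содержать хотя бы одну цифру." else errors
  let errors := if flags.2.2.2 then
    errors.insert "password" "Пароль не должен содержать пробелы." else errors
  let errors := if password ≠ confirm_password then
    errors.insert "confirm_password" "Пароли не совпадают." else errors
  errors.items

-- ===== PRECONDITION & SPEC =====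
def Spec_validate_create_password (password : String) (confirm_password : String) (out : List (String × String)) : Prop := out = validate_create_password_alt password confirm_password
instance (password : String) (confirm_password : String) (out : List (String × String)) : Decidable (Spec_validate_create_password password confirm_password out) := by unfold Spec_validate_create_password; infer_instance

-- ===== CLAIM (what is proved, stated in full; the proofs are below) =====
def Claim_equal_validate_create_password : Prop := ∀ (password : String) (confirm_password : String), Dom_validate_create_password password confirm_password → Spec_validate_create_password password confirm_password (validate_create_password password confirm_password)

-- ===== LEMMAS AND PROOFS =====
theorem isupper_islower (c : Char) (h : PySem.Chars.isupper c = true) : PySem.Chars.islower c = false := by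
  simp [PySem.Chars.isupper, Char.le_def, UInt32.le_iff_toNat_le] at h
  simp [PySem.Chars.islower, Char.le_def, UInt32.le_iff_toNat_le]
  omega

theorem isupper_isdigit (c : Char) (h : PySem.Chars.isupper c = true) : PySem.Chars.isdigit c = false := by
  simp [PySem.Chars.isupper, Char.le_def, UInt32.le_iff_toNat_le] at h
  simp [PySem.Chars.isdigit, Char.le_def, UInt32.le_iff_toNat_le]
  omega

theorem islower_isdigit (c : Char) (h : PySem.Chars.islower c = true) : PySem.Chars.isdigit c = false := by
  simp [PySem.Chars.islower, Char.le_def, UInt32.le_iff_toNat_le] at h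
  simp [PySem.Chars.isdigit, Char.le_def, UInt32.le_iff_toNat_le]
  omega

theorem pvFlagsStep_eq (s : Bool × Bool × Bool × Bool) (c : Char) :
    pvFlagsStep s c = (s.1 || PySem.Chars.isupper c, s.2.1 || PySem.Chars.islower c,
      s.2.2.1 || PySem.Chars.isdigit c, s.2.2.2 || PySem.Chars.isspace c) := by
  unfold pvFlagsStep
  rcases s with ⟨a, b, d, e⟩
  by_cases hu : PySem.Chars.isupper c = true
  · simp [hu, isupper_islower c hu, isupper_isdigit c hu]
    by_cases hs : PySem.Chars.isspace c = true <;> simp [hs]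
  · simp [hu]
    by_cases hl : PySem.Chars.islower c = true
    · simp [hl, islower_isdigit c hl]
      by_cases hs : PySem.Chars.isspace c = true <;> simp [hs]
    · simp [hl]
      by_cases hd : PySem.Chars.isdigit c = true <;>
        [skip; skip] <;> simp [hd] <;>
        (by_cases hs : PySem.Chars.isspace c = true <;> simp [hs])

theorem foldl_flags (l : List Char) (a b d e : Bool) :
    l.foldl pvFlagsStep (a, b, d, e) =
      (a || l.any PySem.Chars.isupper, b || l.any PySem.Chars.islower,
       d || l.any PySem.Chars.isdigit, e || l.any PySem.Chars.isspace) := by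
  induction l generalizing a b d e with
  | nil => simp
  | cons c t ih =>
      simp only [List.foldl_cons, pvFlagsStep_eq, List.any_cons, ih]
      simp [Bool.or_assoc]

-- ===== VERDICT (by name: the statement is the Claim_ definition above) =====
theorem validate_create_password_spec : Claim_equal_validate_create_password := by
  intro password confirm_password _
  unfold Spec_validate_create_password validate_create_password validate_create_password_alt
  rw [foldl_flags]
  simp only [Bool.false_or]
  have h : (PySem.Str.len password < 8 ∨ PySem.Str.len password > 128) ↔
      ¬ (8 ≤ PySem.Str.len password ∧ PySem.Str.len password ≤ 128) := by omega
  simp only [h]
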